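-- pv_equiv track=rewrite | github.com/trifko96/softProjekat | projekat.py | uslov
-- ===== SOURCE A (Python) =====
-- def uslov(x, y, w, h, lista):
--     zbirKor = x + y
--     zbirDim = w + h
--     index = 0
--     index1 = 0
--     znak = 0
--     znak1 = 0
--     for el in lista:
--         index += 1
--         if zbirKor <= (el+2) and zbirKor >= (el-2):
--             znak = 1
--             break
--     for el1 in lista:
--         index1 += 1
--         if zbirDim <= (el1+1) and zbirDim >= (el1-1):
--             znak1 = 1
--             break
--     if znak == 1 and znak1 == 1 and abs(index1 - index) == 1:
--         return 1
--     else: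
--         return 0
-- ===== SOURCE B (Python) =====
-- def uslov(x, y, w, h, lista):
--     zbirKor = x + y
--     zbirDim = w + h
--     found1 = found2 = False
--     i1 = i2 = 0
--     for i, el in enumerate(lista, 1):
--         if not found1 and abs(zbirKor - el) <= 2:
--             found1, i1 = True, i
--         if not found2 and abs(zbirDim - el) <= 1:
--             found2, i2 = True, i
--         if found1 and found2:
--             break
--     return 1 if found1 and found2 and abs(i1 - i2) == 1 else 0
-- ===== Notes on version B (the rewrite author's own statement) =====
-- stated objective: alternative
-- what changed: Replaced A's two sequential break-on-first-match scans over the list with a single pass over enumerate(lista, 1) that maintains two found-flags and two 1-based indices and breaks early once both conditions have matched.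
import Mathlib
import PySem

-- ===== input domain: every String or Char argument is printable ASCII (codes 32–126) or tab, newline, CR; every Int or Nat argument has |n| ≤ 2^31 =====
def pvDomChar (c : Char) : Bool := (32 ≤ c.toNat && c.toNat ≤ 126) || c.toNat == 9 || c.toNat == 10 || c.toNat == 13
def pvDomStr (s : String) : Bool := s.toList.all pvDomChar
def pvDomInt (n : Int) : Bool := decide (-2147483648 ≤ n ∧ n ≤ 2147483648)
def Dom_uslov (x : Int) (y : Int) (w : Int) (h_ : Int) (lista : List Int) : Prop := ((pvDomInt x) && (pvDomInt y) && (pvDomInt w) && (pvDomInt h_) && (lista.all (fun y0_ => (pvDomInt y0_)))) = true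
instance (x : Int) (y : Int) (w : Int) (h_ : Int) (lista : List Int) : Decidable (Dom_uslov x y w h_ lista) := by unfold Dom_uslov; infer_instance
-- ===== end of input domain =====

-- B replaces A's two sequential break-on-first-match scans by one pass over enumerate(lista, 1)
-- keeping two found-flags/indices with an early break once both match (objective: alternative).

-- ===== PORT A =====
-- A's first loop: 1-based index, breaks with znak = 1 on the first el with zbirKor within ±2.
def uslovLoop1 (zbirKor : Int) : List Int → Int → Int × Int
  | [], index => (index, 0)
  | el :: rest, index =>
    let index' := index + 1
    if zbirKor ≤ el + 2 ∧ zbirKor ≥ el - 2 then (index', 1) else uslovLoop1 zbirKor rest index'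

-- A's second loop: same shape with zbirDim within ±1.
def uslovLoop2 (zbirDim : Int) : List Int → Int → Int × Int
  | [], index1 => (index1, 0)
  | el1 :: rest, index1 =>
    let index1' := index1 + 1
    if zbirDim ≤ el1 + 1 ∧ zbirDim ≥ el1 - 1 then (index1', 1) else uslovLoop2 zbirDim rest index1'

def uslov (x : Int) (y : Int) (w : Int) (h_ : Int) (lista : List Int) : Int :=
  let zbirKor := x + y
  let zbirDim := w + h_
  let r := uslovLoop1 zbirKor lista 0
  let r1 := uslovLoop2 zbirDim lista 0
  if r.2 = 1 ∧ r1.2 = 1 ∧ (r1.1 - r.1).natAbs = 1 then 1 else 0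

-- ===== PORT B =====
-- B's single loop over enumerate(lista, 1): state (found1, i1, found2, i2), break once both found.
def uslovLoopB (zK : Int) (zD : Int) : List Int → Int → Bool × Int × Bool × Int → Bool × Int × Bool × Int
  | [], _, st => st
  | el :: rest, i, (f1, i1, f2, i2) =>
    let s1 : Bool × Int := if ¬f1 ∧ (zK - el).natAbs ≤ 2 then (true, i) else (f1, i1)
    let s2 : Bool × Int := if ¬f2 ∧ (zD - el).natAbs ≤ 1 then (true, i) else (f2, i2)
    if s1.1 ∧ s2.1 then (s1.1, s1.2, s2.1, s2.2)
    else uslovLoopB zK zD rest (i + 1) (s1.1, s1.2, s2.1, s2.2)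

def uslov_alt (x : Int) (y : Int) (w : Int) (h_ : Int) (lista : List Int) : Int :=
  let st := uslovLoopB (x + y) (w + h_) lista 1 (false, 0, false, 0)
  if st.1 ∧ st.2.2.1 ∧ (st.2.1 - st.2.2.2).natAbs = 1 then 1 else 0

-- ===== PRECONDITION & SPEC =====
def Spec_uslov (x : Int) (y : Int) (w : Int) (h_ : Int) (lista : List Int) (out : Int) : Prop := out = uslov_alt x y w h_ lista
instance (x : Int) (y : Int) (w : Int) (h_ : Int) (lista : List Int) (out : Int) : Decidable (Spec_uslov x y w h_ lista out) := by unfold Spec_uslov; infer_instance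

-- ===== CLAIM (what is proved, stated in full; the proofs are below) =====
def Claim_equal_uslov : Prop := ∀ (x : Int) (y : Int) (w : Int) (h_ : Int) (lista : List Int), Dom_uslov x y w h_ lista → Spec_uslov x y w h_ lista (uslov x y w h_ lista)

-- ===== LEMMAS AND PROOFS =====

-- first-match predicates, as Booleans
def pvPK (z el : Int) : Bool := (z - el).natAbs ≤ 2
def pvPD (z el : Int) : Bool := (z - el).natAbs ≤ 1

lemma uslovLoop1_eq (z : Int) : ∀ (l : List Int) (a : Int),
    uslovLoop1 z l a =
      match l.findIdx? (pvPK z) with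
      | some k => (a + k + 1, 1)
      | none => (a + l.length, 0) := by
  intro l
  induction l with
  | nil => intro a; simp [uslovLoop1]
  | cons el rest ih =>
    intro a
    by_cases h : (z - el).natAbs ≤ 2
    · have hb : pvPK z el = true := by simp [pvPK]; omega
      simp [uslovLoop1, List.findIdx?_cons, hb]
      omega
    · have hb : pvPK z el = false := by simp [pvPK]; omega
      have hcond : ¬(z ≤ el + 2 ∧ z ≥ el - 2) := by omega
      simp only [uslovLoop1]
      rw [if_neg hcond, ih]
      simp only [List.findIdx?_cons, hb, Bool.false_eq_true, if_false]
      cases hfi : rest.findIdx? (pvPK z) with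
      | some k => simp; omega
      | none => simp [List.length_cons]; omega

lemma uslovLoop2_eq (z : Int) : ∀ (l : List Int) (a : Int),
    uslovLoop2 z l a =
      match l.findIdx? (pvPD z) with
      | some k => (a + k + 1, 1)
      | none => (a + l.length, 0) := by
  intro l
  induction l with
  | nil => intro a; simp [uslovLoop2]
  | cons el rest ih =>
    intro a
    by_cases h : (z - el).natAbs ≤ 1
    · have hb : pvPD z el = true := by simp [pvPD]; omega
      simp [uslovLoop2, List.findIdx?_cons, hb]
      omega
    · have hb : pvPD z el = false := by simp [pvPD]; omega
      have hcond : ¬(z ≤ el + 1 ∧ z ≥ el - 1) := by omega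
      simp only [uslovLoop2]
      rw [if_neg hcond, ih]
      simp only [List.findIdx?_cons, hb, Bool.false_eq_true, if_false]
      cases hfi : rest.findIdx? (pvPD z) with
      | some k => simp; omega
      | none => simp [List.length_cons]; omega

-- B's loop once the first flag is set: only the second search continues.
lemma uslovLoopB_f1 (zK zD : Int) : ∀ (l : List Int) (i j i2 : Int),
    uslovLoopB zK zD l i (true, j, false, i2) =
      match l.findIdx? (pvPD zD) with
      | some k => (true, j, true, i + k)
      | none => (true, j, false, i2) := by
  intro l
  induction l with
  | nil => intro i j i2; simp [uslovLoopB]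
  | cons el rest ih =>
    intro i j i2
    by_cases h : (zD - el).natAbs ≤ 1
    · have hb : pvPD zD el = true := by simp [pvPD]; omega
      simp [uslovLoopB, List.findIdx?_cons, hb, h]
    · have hb : pvPD zD el = false := by simp [pvPD]; omega
      simp [uslovLoopB, List.findIdx?_cons, hb, h, ih]
      cases hfi : rest.findIdx? (pvPD zD) with
      | some k => simp; omega
      | none => simp

-- B's loop once the second flag is set: only the first search continues.
lemma uslovLoopB_f2 (zK zD : Int) : ∀ (l : List Int) (i j i1 : Int),
    uslovLoopB zK zD l i (false, i1, true, j) =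
      match l.findIdx? (pvPK zK) with
      | some k => (true, i + k, true, j)
      | none => (false, i1, true, j) := by
  intro l
  induction l with
  | nil => intro i j i1; simp [uslovLoopB]
  | cons el rest ih =>
    intro i j i1
    by_cases h : (zK - el).natAbs ≤ 2
    · have hb : pvPK zK el = true := by simp [pvPK]; omega
      simp [uslovLoopB, List.findIdx?_cons, hb, h]
    · have hb : pvPK zK el = false := by simp [pvPK]; omega
      simp [uslovLoopB, List.findIdx?_cons, hb, h, ih]
      cases hfi : rest.findIdx? (pvPK zK) with
      | some k => simp; omega
      | none => simp

-- B's loop from a blank state computes both first-match indices independently.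
lemma uslovLoopB_eq (zK zD : Int) : ∀ (l : List Int) (i i1 i2 : Int),
    uslovLoopB zK zD l i (false, i1, false, i2) =
      match l.findIdx? (pvPK zK), l.findIdx? (pvPD zD) with
      | some k1, some k2 => (true, i + k1, true, i + k2)
      | some k1, none => (true, i + k1, false, i2)
      | none, some k2 => (false, i1, true, i + k2)
      | none, none => (false, i1, false, i2) := by
  intro l
  induction l with
  | nil => intro i i1 i2; simp [uslovLoopB]
  | cons el rest ih =>
    intro i i1 i2
    by_cases h1 : (zK - el).natAbs ≤ 2 <;> by_cases h2 : (zD - el).natAbs ≤ 1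
    · have hb1 : pvPK zK el = true := by simp [pvPK]; omega
      have hb2 : pvPD zD el = true := by simp [pvPD]; omega
      simp [uslovLoopB, List.findIdx?_cons, hb1, hb2, h1, h2]
    · have hb1 : pvPK zK el = true := by simp [pvPK]; omega
      have hb2 : pvPD zD el = false := by simp [pvPD]; omega
      simp [uslovLoopB, List.findIdx?_cons, hb1, hb2, h1, h2, uslovLoopB_f1]
      cases hfi : rest.findIdx? (pvPD zD) with
      | some k => simp; omega
      | none => simp
    · have hb1 : pvPK zK el = false := by simp [pvPK]; omega
      have hb2 : pvPD zD el = true := by simp [pvPD]; omega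
      simp [uslovLoopB, List.findIdx?_cons, hb1, hb2, h1, h2, uslovLoopB_f2]
      cases hfi : rest.findIdx? (pvPK zK) with
      | some k => simp; omega
      | none => simp
    · have hb1 : pvPK zK el = false := by simp [pvPK]; omega
      have hb2 : pvPD zD el = false := by simp [pvPD]; omega
      simp [uslovLoopB, List.findIdx?_cons, hb1, hb2, h1, h2, ih]
      cases hf1 : rest.findIdx? (pvPK zK) <;> cases hf2 : rest.findIdx? (pvPD zD) <;> simp <;> omega

-- ===== VERDICT (by name: the statement is the Claim_ definition above) =====
theorem uslov_spec : Claim_equal_uslov := by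
  intro x y w h_ lista _
  unfold Spec_uslov uslov uslov_alt
  simp only [uslovLoop1_eq, uslovLoop2_eq, uslovLoopB_eq]
  cases hf1 : lista.findIdx? (pvPK (x + y)) <;> cases hf2 : lista.findIdx? (pvPD (w + h_)) <;> simp
  case some.some k1 k2 =>
    rw [show ((k2 : Int) - (k1 : Int)).natAbs = ((k1 : Int) - (k2 : Int)).natAbs from by omega]
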